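-- pv_equiv track=rewrite | github.com/jkeckler/coffee-chats-program | src/utils.py | generate_time_ranges
-- ===== SOURCE A (Python) =====
-- def generate_time_ranges(hours: list) -> str:
--     """
--     Convert a list of hours into a formatted string of time ranges
--
--     Args:
--         hours: List of hours (0-23)
--
--     Returns:
--         str: Formatted string of time ranges (e.g., "09:00-11:00, 14:00-16:00")
--
--     Example:
--         >>> generate_time_ranges([9, 10, 11, 14, 15])
--         '09:00-12:00, 14:00-16:00'
--     """
--     if not hours:
--         return ""
--
--     sorted_hours = sorted(hours)
--     ranges = []
--     start = sorted_hours[0]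
--     prev = start
--
--     for hour in sorted_hours[1:]:
--         if hour != prev + 1:
--             ranges.append(f"{start:02d}:00-{prev + 1:02d}:00")
--             start = hour
--         prev = hour
--     ranges.append(f"{start:02d}:00-{prev + 1:02d}:00")
--
--     return ", ".join(ranges)
-- ===== SOURCE B (Python) =====
-- def generate_time_ranges(hours: list) -> str:
--     """Boundary-detection rewrite: two filtered passes over adjacent pairs
--     (range starts and range ends) zipped together, instead of A's running
--     start/prev accumulator loop."""
--     s = sorted(hours)
--     if not s:
--         return ""
--     starts = [s[0]] + [b for a, b in zip(s, s[1:]) if b != a + 1]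
--     ends = [a for a, b in zip(s, s[1:]) if b != a + 1] + [s[-1]]
--     return ", ".join(f"{a:02d}:00-{b + 1:02d}:00" for a, b in zip(starts, ends))
-- ===== Notes on version B (the rewrite author's own statement) =====
-- stated objective: alternative
-- what changed: Replaces A's single stateful start/prev accumulator loop with boundary detection: two filtered passes over adjacent pairs of the sorted list compute the range-start list and range-end list separately, which are then zipped and formatted.
import Mathlib
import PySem

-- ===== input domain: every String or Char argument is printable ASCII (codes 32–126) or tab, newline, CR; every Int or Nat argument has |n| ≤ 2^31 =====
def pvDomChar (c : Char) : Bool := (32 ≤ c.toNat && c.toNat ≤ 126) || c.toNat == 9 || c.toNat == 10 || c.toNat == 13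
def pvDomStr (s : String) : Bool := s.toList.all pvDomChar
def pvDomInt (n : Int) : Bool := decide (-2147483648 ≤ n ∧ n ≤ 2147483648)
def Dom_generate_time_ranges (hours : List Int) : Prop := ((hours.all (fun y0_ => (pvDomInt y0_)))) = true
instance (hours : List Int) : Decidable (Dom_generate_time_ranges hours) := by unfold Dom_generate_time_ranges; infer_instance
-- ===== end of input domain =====

-- B replaces A's running start/prev accumulator loop by boundary detection: two filtered
-- passes over adjacent pairs produce the range-start and range-end lists, which are zipped
-- (objective: alternative decomposition; same cost).

-- shared helper: Python's f"{n:02d}" (exact for every Int: negatives are at least 2 chars wide)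
def pvFmt02 (n : Int) : String :=
  if 0 ≤ n ∧ n ≤ 9 then "0" ++ PySem.Int.toStr n else PySem.Int.toStr n

-- shared helper: the f-string template f"{s:02d}:00-{e:02d}:00" both Pythons contain
def pvRange (s e : Int) : String := pvFmt02 s ++ ":00-" ++ pvFmt02 e ++ ":00"

-- ===== PORT A =====
def generate_time_ranges (hours : List Int) : String :=
  if hours = [] then ""
  else
    let sorted_hours := PySem.List.sorted hours (fun x => x) false
    let start := sorted_hours.headD 0        -- sorted_hours[0]; list nonempty here
    let prev := start
    let st := (sorted_hours.drop 1).foldl (fun (st : List String × Int × Int) hour =>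
      let (ranges, start, prev) := st
      if hour ≠ prev + 1 then (ranges ++ [pvRange start (prev + 1)], hour, hour)
      else (ranges, start, hour)) ([], start, prev)
    PySem.Str.join ", " (st.1 ++ [pvRange st.2.1 (st.2.2 + 1)])

-- ===== PORT B =====
def generate_time_ranges_alt (hours : List Int) : String :=
  let s := PySem.List.sorted hours (fun x => x) false
  if s = [] then ""
  else
    let pairs := s.zip (PySem.List.slice s (some 1) none)   -- zip(s, s[1:])
    let starts := [PySem.List.pyGetD s 0 0]
      ++ (pairs.filter (fun p => p.2 != p.1 + 1)).map (fun p => p.2)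
    let ends := (pairs.filter (fun p => p.2 != p.1 + 1)).map (fun p => p.1)
      ++ [PySem.List.pyGetD s (-1) 0]                       -- s[-1]; list nonempty here
    PySem.Str.join ", " ((starts.zip ends).map (fun p => pvRange p.1 (p.2 + 1)))

-- ===== PRECONDITION & SPEC =====
def Spec_generate_time_ranges (hours : List Int) (out : String) : Prop := out = generate_time_ranges_alt hours
instance (hours : List Int) (out : String) : Decidable (Spec_generate_time_ranges hours out) := by unfold Spec_generate_time_ranges; infer_instance

-- ===== CLAIM (what is proved, stated in full; the proofs are below) =====
def Claim_equal_generate_time_ranges : Prop := ∀ (hours : List Int), Dom_generate_time_ranges hours → Spec_generate_time_ranges hours (generate_time_ranges hours)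

-- ===== LEMMAS AND PROOFS =====

-- reference description of the maximal runs: (start, last) pairs, front to back
def pvRuns (start prev : Int) : List Int → List (Int × Int)
  | [] => [(start, prev)]
  | h :: t => if h = prev + 1 then pvRuns start h t else (start, prev) :: pvRuns h h t

def pvFmtPair (p : Int × Int) : String := pvRange p.1 (p.2 + 1)

-- A's step function, named (definitionally equal to A's lambda)
def pvStepA (st : List String × Int × Int) (hour : Int) : List String × Int × Int :=
  if hour ≠ st.2.2 + 1 then (st.1 ++ [pvRange st.2.1 (st.2.2 + 1)], hour, hour)
  else (st.1, st.2.1, hour)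

-- A's fold produces exactly the formatted runs
theorem pvFoldA (xs : List Int) : ∀ (ranges : List String) (start prev : Int),
    (xs.foldl pvStepA (ranges, start, prev)).1
      ++ [pvRange (xs.foldl pvStepA (ranges, start, prev)).2.1
           ((xs.foldl pvStepA (ranges, start, prev)).2.2 + 1)]
    = ranges ++ (pvRuns start prev xs).map pvFmtPair := by
  induction xs with
  | nil => intro ranges start prev; simp [pvRuns, pvFmtPair]
  | cons h t ih =>
    intro ranges start prev
    rw [List.foldl_cons]
    by_cases hc : h = prev + 1
    · have hstep : pvStepA (ranges, start, prev) h = (ranges, start, h) := by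
        simp [pvStepA, hc]
      rw [hstep, pvRuns, if_pos hc, ih]
    · have hstep : pvStepA (ranges, start, prev) h
          = (ranges ++ [pvRange start (prev + 1)], h, h) := by
        simp [pvStepA, hc]
      rw [hstep, pvRuns, if_neg hc, ih]
      simp [pvFmtPair]

-- B's zipped boundary lists are exactly the runs
theorem pvZipB (xs : List Int) : ∀ (start x : Int),
    (start :: (((x :: xs).zip xs).filter (fun p => p.2 != p.1 + 1)).map (fun p => p.2)).zip
      ((((x :: xs).zip xs).filter (fun p => p.2 != p.1 + 1)).map (fun p => p.1)
        ++ [(x :: xs).getLastD 0])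
    = pvRuns start x xs := by
  induction xs with
  | nil => intro start x; simp [pvRuns]
  | cons h t ih =>
    intro start x
    by_cases hc : h = x + 1
    · have hf : ((x :: h :: t).zip (h :: t)).filter (fun p => p.2 != p.1 + 1)
          = ((h :: t).zip t).filter (fun p => p.2 != p.1 + 1) := by
        simp [hc]
      rw [hf, pvRuns, if_pos hc]
      have hl : (x :: h :: t).getLastD 0 = (h :: t).getLastD 0 := by simp
      rw [hl]; exact ih start h
    · have hf : ((x :: h :: t).zip (h :: t)).filter (fun p => p.2 != p.1 + 1)
          = (x, h) :: ((h :: t).zip t).filter (fun p => p.2 != p.1 + 1) := by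
        simp [hc]
      rw [hf, pvRuns, if_neg hc]
      have hl : (x :: h :: t).getLastD 0 = (h :: t).getLastD 0 := by simp
      simp only [List.map_cons, List.cons_append, List.zip_cons_cons, hl]
      rw [ih h h]

-- ===== VERDICT (by name: the statement is the Claim_ definition above) =====
theorem generate_time_ranges_spec : Claim_equal_generate_time_ranges := by
  intro hours _
  unfold Spec_generate_time_ranges generate_time_ranges generate_time_ranges_alt
  by_cases hnil : hours = []
  · subst hnil; simp [PySem.List.sorted]
  · rw [if_neg hnil]
    cases hs : PySem.List.sorted hours (fun x => x) false with
    | nil => exact absurd ((PySem.List.sorted_eq_nil_iff _ _ _).mp hs) hnil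
    | cons x xs =>
      rw [if_neg (by simp : x :: xs ≠ [])]
      simp only [List.headD_cons, List.drop_one, List.tail_cons]
      have hf : (fun (st : List String × Int × Int) (hour : Int) =>
          let (ranges, start, prev) := st
          if hour ≠ prev + 1 then (ranges ++ [pvRange start (prev + 1)], hour, hour)
          else (ranges, start, hour)) = pvStepA := by
        funext st hour; obtain ⟨r, s, p⟩ := st; rfl
      rw [hf, pvFoldA xs [] x x]
      rw [PySem.List.slice_from_one, List.tail_cons,
        PySem.List.pyGetD_zero_cons,
        PySem.List.pyGetD_neg_one (x :: xs) 0 (by simp),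
        List.getLast_eq_getLastD, ← List.getLastD_cons]
      rw [List.singleton_append, pvZipB xs x x]
      rfl
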